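-- pv_equiv track=rewrite | github.com/ScottLoPinto/ToyProblems | src/2021/june/4/blackjack_highest.py | blackjack_highest
-- ===== SOURCE A (Python) =====
-- def blackjack_highest(str):
--   dict = {
--     "two": 2,
--     "three": 3,
--     "four": 4,
--     "five": 5,
--     "six": 6,
--     "seven": 7,
--     "eight": 8,
--     "nine": 9,
--     "ten": 10,
--     "jack": 10,
--     "queen": 10,
--     "king": 10,
--     "ace": 1,
--   }
--   dictRating = {
--     "" : 0,
--     "two": 2,
--     "three": 3,
--     "four": 4,
--     "five": 5,
--     "six": 6,
--     "seven": 7,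
--     "eight": 8,
--     "nine": 9,
--     "ten": 10,
--     "jack": 11,
--     "queen": 12,
--     "king": 13,
--     "ace": 1,
--   }
--
--   aceCount = 0
--   total = 0
--   highest = ""
--   abvBlw = ""
--
--   for i in str:
--     if(i == "ace"):
--       aceCount += 1
--       total += dict["ace"]
--     else:
--       total += dict[i]
--     if(dictRating[i] > dictRating[highest]):
--       highest = i
--
--   while(total < 12 and aceCount > 0):
--     highest = "ace"
--     total += 10
--     aceCount -= 1
--
--   if(total > 21):
--     abvBlw = "above"
--   elif(total < 21):
--     abvBlw = "below"
--   else: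
--     abvBlw = "blackjack"
--
--   str = abvBlw + " " + highest
--   return str
-- ===== SOURCE B (Python) =====
-- def blackjack_highest(str):
--     value = {"two": 2, "three": 3, "four": 4, "five": 5, "six": 6, "seven": 7,
--              "eight": 8, "nine": 9, "ten": 10, "jack": 10, "queen": 10,
--              "king": 10, "ace": 1}
--     rating = {"two": 2, "three": 3, "four": 4, "five": 5, "six": 6, "seven": 7,
--               "eight": 8, "nine": 9, "ten": 10, "jack": 11, "queen": 12,
--               "king": 13, "ace": 1}
--     total = sum(value[c] for c in str)
--     aceCount = str.count("ace")
--     highest = max(str, key=lambda c: rating[c], default="")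
--     upgrades = min(aceCount, max(0, (21 - total) // 10))
--     if upgrades > 0:
--         total += 10 * upgrades
--         highest = "ace"
--     if total > 21:
--         abvBlw = "above"
--     elif total < 21:
--         abvBlw = "below"
--     else:
--         abvBlw = "blackjack"
--     return abvBlw + " " + highest
-- ===== Notes on version B (the rewrite author's own statement) =====
-- stated objective: idiomatic
-- what changed: A's single fused loop carrying (aceCount, total, highest) plus a while-loop is replaced by separate idiomatic passes -- sum over the point-value dict, str.count('ace'), max(str, key=rating, default='') -- and a closed-form upgrade count min(aceCount, max(0, (21-total)//10)) instead of the ace-upgrade while-loop.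
import Mathlib
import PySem

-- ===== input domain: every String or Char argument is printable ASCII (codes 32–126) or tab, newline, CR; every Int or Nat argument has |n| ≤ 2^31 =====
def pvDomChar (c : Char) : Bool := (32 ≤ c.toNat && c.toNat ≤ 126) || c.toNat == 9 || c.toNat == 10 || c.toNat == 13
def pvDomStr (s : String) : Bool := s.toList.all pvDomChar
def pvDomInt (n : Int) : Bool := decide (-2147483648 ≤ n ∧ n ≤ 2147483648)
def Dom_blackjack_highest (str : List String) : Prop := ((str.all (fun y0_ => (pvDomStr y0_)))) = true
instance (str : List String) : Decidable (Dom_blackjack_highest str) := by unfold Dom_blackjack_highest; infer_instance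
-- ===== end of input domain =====

-- B replaces A's single fused loop by separate passes (sum via the point dict, list.count for aces,
-- max-with-key for the highest card) and a closed form for the ace-upgrade while-loop; objective: idiomatic.

-- ===== PORT A =====
def pvDictA : PySem.Dict String Int := PySem.Dict.ofList
  [("two", 2), ("three", 3), ("four", 4), ("five", 5), ("six", 6), ("seven", 7), ("eight", 8),
   ("nine", 9), ("ten", 10), ("jack", 10), ("queen", 10), ("king", 10), ("ace", 1)]

def pvDictR : PySem.Dict String Int := PySem.Dict.ofList
  [("", 0), ("two", 2), ("three", 3), ("four", 4), ("five", 5), ("six", 6), ("seven", 7),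
   ("eight", 8), ("nine", 9), ("ten", 10), ("jack", 11), ("queen", 12), ("king", 13), ("ace", 1)]

-- one iteration of A's for-loop over (aceCount, total, highest); `none` = Python's KeyError (excluded by Pre_)
def pvStepA (st : Option (Int × Int × String)) (i : String) : Option (Int × Int × String) :=
  match st with
  | none => none
  | some (aceCount, total, highest) =>
    match (if i == "ace" then (pvDictA.get? "ace").map (fun v => (aceCount + 1, total + v))
           else (pvDictA.get? i).map (fun v => (aceCount, total + v))) with
    | none => none
    | some (aceCount', total') =>
      match pvDictR.get? i, pvDictR.get? highest with
      | some ri, some rh => some (aceCount', total', if rh < ri then i else highest)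
      | _, _ => none

-- A's while-loop (returns the final total and highest)
def pvWhileA (total aceCount : Int) (highest : String) : Int × String :=
  if h : total < 12 ∧ aceCount > 0 then pvWhileA (total + 10) (aceCount - 1) "ace"
  else (total, highest)
termination_by aceCount.toNat
decreasing_by omega

def blackjack_highest (str : List String) : String :=
  match str.foldl pvStepA (some (0, 0, "")) with
  | none => ""   -- Python raises KeyError here; excluded by Pre_
  | some (aceCount, total, highest) =>
    let r := pvWhileA total aceCount highest
    let abvBlw := if r.1 > 21 then "above" else if r.1 < 21 then "below" else "blackjack"
    PySem.Str.join " " [abvBlw, r.2]   -- abvBlw + " " + highest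

-- ===== PORT B =====
-- Source B's `value` dict is the same literal as A's: the port reuses pvDictA for it
def pvDictRB : PySem.Dict String Int := PySem.Dict.ofList
  [("two", 2), ("three", 3), ("four", 4), ("five", 5), ("six", 6), ("seven", 7), ("eight", 8),
   ("nine", 9), ("ten", 10), ("jack", 11), ("queen", 12), ("king", 13), ("ace", 1)]

def blackjack_highest_alt (str : List String) : String :=
  let total := (str.map (fun c => pvDictA.getD c 0)).sum
  let aceCount : Int := PySem.List.count str "ace"
  let highest := PySem.List.maxD str (fun c => pvDictRB.getD c 0) ""
  let upgrades := min aceCount (max 0 (PySem.Int.floordiv (21 - total) 10))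
  let total2 := if upgrades > 0 then total + 10 * upgrades else total
  let highest2 := if upgrades > 0 then "ace" else highest
  let abvBlw := if total2 > 21 then "above" else if total2 < 21 then "below" else "blackjack"
  PySem.Str.join " " [abvBlw, highest2]

-- ===== PRECONDITION & SPEC =====
-- the 13 card names = the keys of A's point-value dict (in order)
def pvCards : List String := pvDictA.items.map Prod.fst

-- Pre_ excludes exactly the hands containing a string that is no card name: A raises KeyError there.
def Pre_blackjack_highest (str : List String) : Prop := ∀ s ∈ str, s ∈ pvCards
instance (str : List String) : Decidable (Pre_blackjack_highest str) := by
  unfold Pre_blackjack_highest; infer_instance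

def pvWitness_blackjack_highest : List String := ["ace", "king", "two"]

def Spec_blackjack_highest (str : List String) (out : String) : Prop := out = blackjack_highest_alt str
instance (str : List String) (out : String) : Decidable (Spec_blackjack_highest str out) := by
  unfold Spec_blackjack_highest; infer_instance

-- ===== CLAIM (what is proved, stated in full; the proofs are below) =====
def Claim_equal_blackjack_highest : Prop := ∀ (str : List String), Dom_blackjack_highest str → Pre_blackjack_highest str → Spec_blackjack_highest str (blackjack_highest str)

-- ===== LEMMAS AND PROOFS =====

-- the two dicts as functions, on the card names (pvRat "" = 0 like A's dictRating[""])
def pvVal (s : String) : Int :=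
  if s = "two" then 2 else if s = "three" then 3 else if s = "four" then 4
  else if s = "five" then 5 else if s = "six" then 6 else if s = "seven" then 7
  else if s = "eight" then 8 else if s = "nine" then 9 else if s = "ace" then 1 else 10

def pvRat (s : String) : Int :=
  if s = "two" then 2 else if s = "three" then 3 else if s = "four" then 4
  else if s = "five" then 5 else if s = "six" then 6 else if s = "seven" then 7
  else if s = "eight" then 8 else if s = "nine" then 9 else if s = "ten" then 10
  else if s = "jack" then 11 else if s = "queen" then 12 else if s = "king" then 13
  else if s = "ace" then 1 else 0

-- A's running-highest scan
def pvScanHi (h : String) : List String → String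
  | [] => h
  | i :: t => pvScanHi (if pvRat h < pvRat i then i else h) t

theorem pvCards_eq : pvCards = ["two", "three", "four", "five", "six", "seven", "eight",
    "nine", "ten", "jack", "queen", "king", "ace"] := by decide

theorem pv_lookup (s : String) (hs : s ∈ pvCards) :
    pvDictA.get? s = some (pvVal s) ∧ pvDictR.get? s = some (pvRat s) ∧
    pvDictA.getD s 0 = pvVal s ∧ pvDictRB.getD s 0 = pvRat s ∧ 1 ≤ pvRat s := by
  rw [pvCards_eq] at hs
  simp only [List.mem_cons, List.not_mem_nil, or_false] at hs
  rcases hs with rfl | rfl | rfl | rfl | rfl | rfl | rfl | rfl | rfl | rfl | rfl | rfl | rfl <;>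
    exact ⟨by decide, by decide, by decide, by decide, by decide⟩

theorem pv_stepA_card (ace total : Int) (h i : String) (hi : i ∈ pvCards)
    (hrh : pvDictR.get? h = some (pvRat h)) :
    pvStepA (some (ace, total, h)) i =
      some ((if i = "ace" then ace + 1 else ace), total + pvVal i,
            if pvRat h < pvRat i then i else h) := by
  obtain ⟨hvA, hrA, -, -, -⟩ := pv_lookup i hi
  by_cases hia : i = "ace"
  · subst hia
    simp [pvStepA, hvA, hrA, hrh]
  · have hbeq : (i == "ace") = false := by simp [hia]
    simp [pvStepA, hbeq, hvA, hrA, hrh, hia]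

theorem pv_foldA (str : List String) : ∀ (ace total : Int) (h : String),
    (∀ s ∈ str, s ∈ pvCards) → (h = "" ∨ h ∈ pvCards) →
    str.foldl pvStepA (some (ace, total, h)) =
      some (ace + (PySem.List.count str "ace" : Int), total + (str.map pvVal).sum,
            pvScanHi h str) := by
  induction str with
  | nil => intro ace total h _ _; simp [PySem.List.count, pvScanHi]
  | cons i t ih =>
    intro ace total h hmem hh
    have hi : i ∈ pvCards := hmem i (by simp)
    have hrh : pvDictR.get? h = some (pvRat h) := by
      rcases hh with rfl | hh
      · decide
      · exact (pv_lookup h hh).2.1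
    have hh' : (if pvRat h < pvRat i then i else h) = "" ∨ (if pvRat h < pvRat i then i else h) ∈ pvCards := by
      split_ifs
      · exact Or.inr hi
      · exact hh
    rw [List.foldl_cons, pv_stepA_card ace total h i hi hrh,
        ih _ _ _ (fun s hs => hmem s (List.mem_cons_of_mem _ hs)) hh']
    simp only [Option.some.injEq, Prod.mk.injEq, pvScanHi, PySem.List.count, List.count_cons]
    refine ⟨?_, ?_, ?_⟩
    · by_cases hia : i = "ace" <;> simp [hia] <;> omega
    · simp only [List.map_cons, List.sum_cons]; ring
    · trivial

theorem pv_maxaux (t : List String) : ∀ (m : String), (∀ s ∈ t, s ∈ pvCards) → m ∈ pvCards →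
    PySem.List.max? (m :: t) (fun c => pvDictRB.getD c 0) = some (pvScanHi m t) := by
  induction t with
  | nil => intro m _ _; simp [PySem.List.max?, pvScanHi]
  | cons i t ih =>
    intro m hmem hm
    have hi : i ∈ pvCards := hmem i (by simp)
    have hkm : pvDictRB.getD m 0 = pvRat m := (pv_lookup m hm).2.2.2.1
    have hki : pvDictRB.getD i 0 = pvRat i := (pv_lookup i hi).2.2.2.1
    have step : PySem.List.max? (m :: i :: t) (fun c => pvDictRB.getD c 0) =
        PySem.List.max? ((if pvRat m < pvRat i then i else m) :: t) (fun c => pvDictRB.getD c 0) := by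
      simp only [PySem.List.max?, List.foldl_cons, hkm, hki]
      split_ifs <;> rfl
    have hnext : (if pvRat m < pvRat i then i else m) ∈ pvCards := by
      split_ifs
      · exact hi
      · exact hm
    rw [step, ih _ (fun s hs => hmem s (List.mem_cons_of_mem _ hs)) hnext]
    simp [pvScanHi]

theorem pv_maxD (str : List String) (hpre : ∀ s ∈ str, s ∈ pvCards) :
    PySem.List.maxD str (fun c => pvDictRB.getD c 0) "" = pvScanHi "" str := by
  cases str with
  | nil => rfl
  | cons x t =>
    have hx : x ∈ pvCards := hpre x (by simp)
    have hx1 : 1 ≤ pvRat x := (pv_lookup x hx).2.2.2.2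
    have : pvScanHi "" (x :: t) = pvScanHi x t := by
      have : pvRat "" < pvRat x := by
        have : pvRat "" = 0 := by decide
        omega
      simp [pvScanHi, this]
    rw [this, PySem.List.maxD,
        pv_maxaux t x (fun s hs => hpre s (List.mem_cons_of_mem _ hs)) hx]
    rfl

theorem pv_while (total ace : Int) (h : String) :
    pvWhileA total ace h =
      (if min ace (max 0 (PySem.Int.floordiv (21 - total) 10)) > 0
         then total + 10 * min ace (max 0 (PySem.Int.floordiv (21 - total) 10)) else total,
       if min ace (max 0 (PySem.Int.floordiv (21 - total) 10)) > 0 then "ace" else h) := by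
  induction total, ace, h using pvWhileA.induct with
  | case1 total ace h hc ih =>
    have hb1 := PySem.Int.floordiv_mul_add_mod (21 - total) 10
    have hb2 := PySem.Int.mod_nonneg (a := 21 - total) (b := 10) (by omega)
    have hb3 := PySem.Int.mod_lt (a := 21 - total) (b := 10) (by omega)
    have hb1' := PySem.Int.floordiv_mul_add_mod (21 - (total + 10)) 10
    have hb2' := PySem.Int.mod_nonneg (a := 21 - (total + 10)) (b := 10) (by omega)
    have hb3' := PySem.Int.mod_lt (a := 21 - (total + 10)) (b := 10) (by omega)
    rw [pvWhileA, dif_pos hc, ih]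
    simp only [Prod.mk.injEq]
    constructor
    · split_ifs <;> omega
    · split_ifs with h1 h2 h2
      · rfl
      · exfalso; omega
      · rfl
      · exfalso; omega
  | case2 total ace h hc =>
    have hb1 := PySem.Int.floordiv_mul_add_mod (21 - total) 10
    have hb2 := PySem.Int.mod_nonneg (a := 21 - total) (b := 10) (by omega)
    have hb3 := PySem.Int.mod_lt (a := 21 - total) (b := 10) (by omega)
    rw [pvWhileA, dif_neg hc]
    simp only [Prod.mk.injEq]
    constructor
    · split_ifs <;> omega
    · split_ifs with h1
      · exfalso; omega
      · rfl

-- ===== VERDICT (by name: the statement is the Claim_ definition above) =====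
theorem blackjack_highest_spec : Claim_equal_blackjack_highest := by
  intro str _ hpre
  show blackjack_highest str = blackjack_highest_alt str
  have hfold := pv_foldA str 0 0 "" hpre (Or.inl rfl)
  have hmapeq : str.map (fun c => pvDictA.getD c 0) = str.map pvVal :=
    List.map_congr_left (fun s hs => (pv_lookup s (hpre s hs)).2.2.1)
  simp only [blackjack_highest, blackjack_highest_alt, hfold, hmapeq, pv_maxD str hpre,
    pv_while, zero_add]
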